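-- pv_equiv track=rewrite | github.com/sukminc/hero-performance-os | app/api/hud_trend.py | _find_preflop_stats
-- ===== SOURCE A (Python) =====
-- def _find_preflop_stats(position: str | None, preflop_actions: list[dict[str, str]]) -> dict[str, bool]:
--     vpip = False
--     pfr = False
--     ats_opportunity = False
--     ats_attempt = False
--     three_bet_opportunity = False
--     three_bet = False
--
--     hero_index = None
--     for index, action in enumerate(preflop_actions):
--         if action["actor"] != "Hero":
--             continue
--         hero_index = index
--         break
--
--     if hero_index is None:
--         return {
--             "vpip": False,
--             "pfr": False,
--             "ats_opportunity": False,
--             "ats_attempt": False,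
--             "three_bet_opportunity": False,
--             "three_bet": False,
--         }
--
--     hero_action = preflop_actions[hero_index]["action"]
--     prior_actions = preflop_actions[:hero_index]
--     prior_raises = [action for action in prior_actions if action["action"] == "raise"]
--     vpip = hero_action in {"call", "raise"}
--     pfr = hero_action == "raise"
--     ats_opportunity = position in {"CO", "BTN", "SB"} and len(prior_raises) == 0
--     ats_attempt = ats_opportunity and hero_action == "raise"
--     three_bet_opportunity = len(prior_raises) == 1
--     three_bet = three_bet_opportunity and hero_action == "raise"
--
--     return {
--         "vpip": vpip,
--         "pfr": pfr,
--         "ats_opportunity": ats_opportunity,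
--         "ats_attempt": ats_attempt,
--         "three_bet_opportunity": three_bet_opportunity,
--         "three_bet": three_bet,
--     }
-- ===== SOURCE B (Python) =====
-- def _find_preflop_stats(position, preflop_actions):
--     # Single pass: count raises before Hero's first action; stop at Hero.
--     keys = ("vpip", "pfr", "ats_opportunity", "ats_attempt",
--             "three_bet_opportunity", "three_bet")
--     prior_raises = 0
--     for action in preflop_actions:
--         if action["actor"] == "Hero":
--             hero_action = action["action"]
--             pfr = hero_action == "raise"
--             ats_opportunity = position in ("CO", "BTN", "SB") and prior_raises == 0
--             three_bet_opportunity = prior_raises == 1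
--             return {
--                 "vpip": hero_action in ("call", "raise"),
--                 "pfr": pfr,
--                 "ats_opportunity": ats_opportunity,
--                 "ats_attempt": ats_opportunity and pfr,
--                 "three_bet_opportunity": three_bet_opportunity,
--                 "three_bet": three_bet_opportunity and pfr,
--             }
--         if action.get("action") == "raise":
--             prior_raises += 1
--     return {k: False for k in keys}
-- ===== Notes on version B (the rewrite author's own statement) =====
-- stated objective: simpler
-- what changed: Replaces A's three passes (index-finding loop, slice, filter comprehension) by one fused pass that counts prior raises in an integer and returns as soon as Hero's action is found.
import Mathlib
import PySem

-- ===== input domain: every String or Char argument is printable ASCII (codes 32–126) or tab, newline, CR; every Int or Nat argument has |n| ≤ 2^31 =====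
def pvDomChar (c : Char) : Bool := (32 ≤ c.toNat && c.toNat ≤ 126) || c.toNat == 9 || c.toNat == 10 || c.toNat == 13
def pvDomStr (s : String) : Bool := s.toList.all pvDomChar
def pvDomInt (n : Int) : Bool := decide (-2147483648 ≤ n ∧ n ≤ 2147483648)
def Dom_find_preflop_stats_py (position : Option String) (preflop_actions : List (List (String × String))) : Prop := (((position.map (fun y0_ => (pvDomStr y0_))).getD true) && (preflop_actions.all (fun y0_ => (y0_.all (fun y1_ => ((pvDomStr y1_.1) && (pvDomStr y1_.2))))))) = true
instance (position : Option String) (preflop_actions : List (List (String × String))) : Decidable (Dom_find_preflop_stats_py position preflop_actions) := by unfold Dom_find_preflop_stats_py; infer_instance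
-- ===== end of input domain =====

-- B fuses A's three passes (Hero-index loop, slice, raise-filter) into one pass with
-- an integer counter and an early return: simpler, same behaviour.

-- ===== PORT A =====
-- the enumerate-loop searching for Hero's index (d["actor"] ported as first-match lookup)
def pvHeroIdxA : List (List (String × String)) → Nat → Option Nat
  | [], _ => none
  | d :: rest, i =>
    if (List.lookup "actor" d).getD "" ≠ "Hero" then pvHeroIdxA rest (i + 1)
    else some i

def find_preflop_stats_py (position : Option String) (preflop_actions : List (List (String × String))) : List (String × Bool) :=
  match pvHeroIdxA preflop_actions 0 with
  | none =>
      [("vpip", false), ("pfr", false), ("ats_opportunity", false),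
       ("ats_attempt", false), ("three_bet_opportunity", false), ("three_bet", false)]
  | some hero_index =>
      let hero_action := (List.lookup "action" ((PySem.List.pyGet? preflop_actions (hero_index : Int)).getD [])).getD ""
      let prior_actions := PySem.List.slice preflop_actions (some 0) (some (hero_index : Int))
      let prior_raises := prior_actions.filter (fun a => (List.lookup "action" a).getD "" == "raise")
      let vpip := hero_action == "call" || hero_action == "raise"
      let pfr := hero_action == "raise"
      let ats_opportunity := (position == some "CO" || position == some "BTN" || position == some "SB") && prior_raises.length == 0
      let ats_attempt := ats_opportunity && hero_action == "raise"
      let three_bet_opportunity := prior_raises.length == 1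
      let three_bet := three_bet_opportunity && hero_action == "raise"
      [("vpip", vpip), ("pfr", pfr), ("ats_opportunity", ats_opportunity),
       ("ats_attempt", ats_attempt), ("three_bet_opportunity", three_bet_opportunity),
       ("three_bet", three_bet)]

-- ===== PORT B =====
-- single pass with a prior-raise counter, early return at Hero
def pvGoB (position : Option String) : List (List (String × String)) → Nat → List (String × Bool)
  | [], _ =>
      [("vpip", false), ("pfr", false), ("ats_opportunity", false),
       ("ats_attempt", false), ("three_bet_opportunity", false), ("three_bet", false)]
  | d :: rest, prior_raises =>
    if (List.lookup "actor" d).getD "" == "Hero" then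
      let hero_action := (List.lookup "action" d).getD ""
      let pfr := hero_action == "raise"
      let ats_opportunity := (position == some "CO" || position == some "BTN" || position == some "SB") && prior_raises == 0
      let three_bet_opportunity := prior_raises == 1
      [("vpip", hero_action == "call" || hero_action == "raise"), ("pfr", pfr),
       ("ats_opportunity", ats_opportunity), ("ats_attempt", ats_opportunity && pfr),
       ("three_bet_opportunity", three_bet_opportunity), ("three_bet", three_bet_opportunity && pfr)]
    else
      -- action.get("action") == "raise": missing key gives Python None == "raise" = False,
      -- so getD "" (and "" ≠ "raise") is exact here
      pvGoB position rest (if (List.lookup "action" d).getD "" == "raise" then prior_raises + 1 else prior_raises)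

def find_preflop_stats_py_alt (position : Option String) (preflop_actions : List (List (String × String))) : List (String × Bool) :=
  pvGoB position preflop_actions 0

-- ===== PRECONDITION & SPEC =====
-- Pre_ is exactly where Python A returns (else KeyError): every action dict scanned before a
-- Hero is seen must carry the "actor" key, and if the scan reaches a Hero entry then that
-- entry and all earlier ones must also carry the "action" key.
def Pre_find_preflop_stats_py (position : Option String) (preflop_actions : List (List (String × String))) : Prop :=
  ∀ i, (hi : i < preflop_actions.length) →
    (∀ j, (hj : j < i) →
        (List.lookup "actor" (preflop_actions[j]'(Nat.lt_trans hj hi))).getD "" ≠ "Hero") →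
    (List.lookup "actor" preflop_actions[i]).isSome = true ∧
    ((List.lookup "actor" preflop_actions[i]).getD "" = "Hero" →
      ∀ j, (hj : j ≤ i) →
        (List.lookup "action" (preflop_actions[j]'(Nat.lt_of_le_of_lt hj hi))).isSome = true)

instance (position : Option String) (preflop_actions : List (List (String × String))) : Decidable (Pre_find_preflop_stats_py position preflop_actions) := by
  unfold Pre_find_preflop_stats_py; infer_instance

def pvWitness_find_preflop_stats_py : Option String × (List (List (String × String))) :=
  (some "CO", [[("actor", "UTG"), ("action", "raise")], [("actor", "Hero"), ("action", "raise")]])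

def Spec_find_preflop_stats_py (position : Option String) (preflop_actions : List (List (String × String))) (out : List (String × Bool)) : Prop := out = find_preflop_stats_py_alt position preflop_actions
instance (position : Option String) (preflop_actions : List (List (String × String))) (out : List (String × Bool)) : Decidable (Spec_find_preflop_stats_py position preflop_actions out) := by unfold Spec_find_preflop_stats_py; infer_instance

-- ===== CLAIM (what is proved, stated in full; the proofs are below) =====
def Claim_equal_find_preflop_stats_py : Prop := ∀ (position : Option String) (preflop_actions : List (List (String × String))), Dom_find_preflop_stats_py position preflop_actions → Pre_find_preflop_stats_py position preflop_actions → Spec_find_preflop_stats_py position preflop_actions (find_preflop_stats_py position preflop_actions)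

-- ===== LEMMAS AND PROOFS =====

-- the six flags as A computes them from Hero's action and the number of prior raises
def pvFlags (position : Option String) (hero_action : String) (n : Nat) : List (String × Bool) :=
  [("vpip", hero_action == "call" || hero_action == "raise"),
   ("pfr", hero_action == "raise"),
   ("ats_opportunity", (position == some "CO" || position == some "BTN" || position == some "SB") && n == 0),
   ("ats_attempt", ((position == some "CO" || position == some "BTN" || position == some "SB") && n == 0) && hero_action == "raise"),
   ("three_bet_opportunity", n == 1),
   ("three_bet", (n == 1) && hero_action == "raise")]

theorem pvHeroIdxA_shift (pa : List (List (String × String))) : ∀ n : Nat, pvHeroIdxA pa n = (pvHeroIdxA pa 0).map (· + n) := by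
  induction pa with
  | nil => intro n; simp [pvHeroIdxA]
  | cons d rest ih =>
    intro n
    by_cases h : (List.lookup "actor" d).getD "" ≠ "Hero"
    · simp only [pvHeroIdxA, if_pos h, ih (n + 1), ih 1, Option.map_map]
      cases pvHeroIdxA rest 0 <;> simp <;> omega
    · simp [pvHeroIdxA, h]

theorem pvGoB_eq (position : Option String) (pa : List (List (String × String))) : ∀ c : Nat,
    pvGoB position pa c =
      match pvHeroIdxA pa 0 with
      | none =>
          [("vpip", false), ("pfr", false), ("ats_opportunity", false),
           ("ats_attempt", false), ("three_bet_opportunity", false), ("three_bet", false)]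
      | some i =>
          pvFlags position
            ((List.lookup "action" ((PySem.List.pyGet? pa (i : Int)).getD [])).getD "")
            (c + ((PySem.List.slice pa (some 0) (some (i : Int))).filter
                    (fun a => (List.lookup "action" a).getD "" == "raise")).length) := by
  induction pa with
  | nil => intro c; simp [pvGoB, pvHeroIdxA]
  | cons d rest ih =>
    intro c
    by_cases h : (List.lookup "actor" d).getD "" = "Hero"
    · have h1 : ¬ (List.lookup "actor" d).getD "" ≠ "Hero" := by simp [h]
      simp only [pvGoB, pvHeroIdxA, if_neg h1, if_pos (beq_iff_eq.mpr h)]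
      simp [pvFlags, PySem.List.slice]
    · have h' : (List.lookup "actor" d).getD "" ≠ "Hero" := h
      have hb : ¬ ((List.lookup "actor" d).getD "" == "Hero") = true := by
        simp [h]
      simp only [pvGoB, pvHeroIdxA, if_pos h', if_neg hb]
      rw [ih, pvHeroIdxA_shift rest 1]
      cases hj : pvHeroIdxA rest 0 with
      | none => simp
      | some j =>
        have hc : ((j + 1 : Nat) : Int) = (j : Int) + 1 := by push_cast; ring
        have hget : (PySem.List.pyGet? (d :: rest) ((j : Int) + 1)).getD [] = (PySem.List.pyGet? rest (j : Int)).getD [] := by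
          rw [← hc]; simp [PySem.List.pyGet?_natCast]
        have hslice : PySem.List.slice (d :: rest) none (some ((j : Int) + 1)) =
            d :: PySem.List.slice rest none (some (j : Int)) := by
          rw [← hc, PySem.List.slice_to_natCast, PySem.List.slice_to_natCast]
          simp
        simp only [Option.map_some, Nat.cast_add, Nat.cast_one, PySem.List.slice_zero_start,
          hget, hslice, List.filter_cons]
        by_cases hr : ((List.lookup "action" d).getD "" == "raise") = true
        · simp only [hr, if_pos, List.length_cons]
          congr 1
          omega
        · simp [hr]

-- ===== VERDICT (by name: the statement is the Claim_ definition above) =====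
theorem find_preflop_stats_py_spec : Claim_equal_find_preflop_stats_py := by
  intro position preflop_actions _ _
  unfold Spec_find_preflop_stats_py find_preflop_stats_py find_preflop_stats_py_alt
  rw [pvGoB_eq]
  cases pvHeroIdxA preflop_actions 0 <;> simp [pvFlags]
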